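-- pv_equiv track=rewrite | github.com/luminis-wf/wayfinder-paths-sdk | examples/paths/pt-carry-roller-demo/scripts/pt_carry_backtest.py | _group_by_ts
-- ===== SOURCE A (Python) =====
-- from typing import Any
--
-- def _group_by_ts(rows: list[dict[str, Any]]) -> dict[str, list[dict[str, Any]]]:
--     grouped: dict[str, list[dict[str, Any]]] = {}
--     for row in rows:
--         ts = row.get("ts")
--         if not isinstance(ts, str) or not ts.strip():
--             continue
--         grouped.setdefault(ts, []).append(row)
--     return grouped
-- ===== SOURCE B (Python) =====
-- def _group_by_ts(rows):
--     valid = [row for row in rows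
--              if isinstance(row.get("ts"), str) and row.get("ts").strip()]
--     keys = list(dict.fromkeys(row["ts"] for row in valid))
--     return {k: [row for row in valid if row["ts"] == k] for k in keys}
-- ===== Notes on version B (the rewrite author's own statement) =====
-- stated objective: alternative
-- what changed: Replaces the single-pass dict-with-setdefault accumulation by a two-phase plan: filter valid rows, take the ordered-deduplicated key list, then build each group by a per-key scan of the filtered rows.
import Mathlib
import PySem

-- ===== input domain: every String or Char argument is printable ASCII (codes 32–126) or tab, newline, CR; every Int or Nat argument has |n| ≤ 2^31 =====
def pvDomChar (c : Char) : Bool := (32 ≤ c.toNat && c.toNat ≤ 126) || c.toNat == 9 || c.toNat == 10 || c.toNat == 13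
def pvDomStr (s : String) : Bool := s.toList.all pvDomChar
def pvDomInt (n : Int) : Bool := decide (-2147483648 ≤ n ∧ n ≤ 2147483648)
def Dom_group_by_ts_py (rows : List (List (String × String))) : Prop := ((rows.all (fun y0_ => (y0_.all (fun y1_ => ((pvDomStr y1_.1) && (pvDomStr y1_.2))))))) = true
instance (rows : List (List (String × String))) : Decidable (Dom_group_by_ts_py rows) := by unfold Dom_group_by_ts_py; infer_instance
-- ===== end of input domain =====

-- B replaces A's single-pass setdefault-dict accumulation by filter + ordered key dedup + per-key scans (alternative decomposition, same results).


-- ===== PORT A =====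
-- grouped: dict; for row in rows: ts = row.get("ts"); skip unless ts is a (present) non-blank string;
-- grouped.setdefault(ts, []).append(row)  ==  grouped[ts] = grouped.get(ts, []) + [row]  (Dict.modify)
def group_by_ts_py (rows : List (List (String × String))) : List (String × List (List (String × String))) :=
  (rows.foldl (fun g row =>
      match (PySem.Dict.mk row).get? "ts" with
      | none => g
      | some ts => if PySem.Str.strip ts = "" then g
                   else g.modify ts [] (· ++ [row]))
    PySem.Dict.empty).items

-- ===== PORT B =====
-- isinstance(row.get("ts"), str) and row.get("ts").strip()
def pvIsValid (row : List (String × String)) : Bool :=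
  match (PySem.Dict.mk row).get? "ts" with
  | none => false
  | some ts => !(PySem.Str.strip ts = "")
-- row["ts"]; only applied to rows that passed pvIsValid, where the key is present
def pvTs (row : List (String × String)) : String :=
  ((PySem.Dict.mk row).get? "ts").getD ""

def group_by_ts_py_alt (rows : List (List (String × String))) : List (String × List (List (String × String))) :=
  let valid := rows.filter pvIsValid
  let keys := PySem.List.dedup (valid.map pvTs)
  keys.map (fun k => (k, valid.filter (fun row => pvTs row == k)))

-- ===== PRECONDITION & SPEC =====
def Spec_group_by_ts_py (rows : List (List (String × String))) (out : List (String × List (List (String × String)))) : Prop := out = group_by_ts_py_alt rows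
instance (rows : List (List (String × String))) (out : List (String × List (List (String × String)))) : Decidable (Spec_group_by_ts_py rows out) := by unfold Spec_group_by_ts_py; infer_instance

-- ===== CLAIM (what is proved, stated in full; the proofs are below) =====
def Claim_equal_group_by_ts_py : Prop := ∀ (rows : List (List (String × String))), Dom_group_by_ts_py rows → Spec_group_by_ts_py rows (group_by_ts_py rows)

-- ===== LEMMAS AND PROOFS =====

-- A's loop body, rewritten through B's predicates
theorem pvStep_eq (g : PySem.Dict String (List (List (String × String)))) (row : List (String × String)) :
    (match (PySem.Dict.mk row).get? "ts" with
      | none => g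
      | some ts => if PySem.Str.strip ts = "" then g
                   else g.modify ts [] (· ++ [row]))
    = if pvIsValid row then g.modify (pvTs row) [] (· ++ [row]) else g := by
  unfold pvIsValid pvTs
  cases h : (PySem.Dict.mk row).get? "ts" with
  | none => simp
  | some ts => by_cases hs : PySem.Str.strip ts = "" <;> simp [hs]

theorem pvFoldl_eq (rows : List (List (String × String))) :
    group_by_ts_py rows =
      (((rows.filter pvIsValid).map (fun r => (pvTs r, r))).foldl
        (fun (d : PySem.Dict String (List (List (String × String)))) p => d.modify p.1 [] (· ++ [p.2])) PySem.Dict.empty).items := by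
  unfold group_by_ts_py
  have h1 : rows.foldl (fun (g : PySem.Dict String (List (List (String × String)))) row =>
      match (PySem.Dict.mk row).get? "ts" with
      | none => g
      | some ts => if PySem.Str.strip ts = "" then g
                   else g.modify ts [] (· ++ [row])) PySem.Dict.empty
      = rows.foldl (fun g row => if pvIsValid row then g.modify (pvTs row) [] (· ++ [row]) else g) PySem.Dict.empty :=
    PySem.List.foldl_congr_mem rows _ _ _ (fun acc x _ => pvStep_eq acc x)
  rw [h1, PySem.List.foldl_if_eq_foldl_filter, List.foldl_map]

theorem group_by_ts_py_eq_alt (rows : List (List (String × String))) :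
    group_by_ts_py rows = group_by_ts_py_alt rows := by
  rw [pvFoldl_eq]
  unfold group_by_ts_py_alt
  set valid := rows.filter pvIsValid with hv
  set pairs := valid.map (fun r => (pvTs r, r)) with hp
  have hnd : (pairs.foldl (fun d p => d.modify p.1 [] (· ++ [p.2])) PySem.Dict.empty).keys.Nodup := by
    exact PySem.Dict.nodup_keys_foldl_modify_key pairs Prod.fst [] (fun d p => (· ++ [p.2])) _ PySem.Dict.nodup_keys_empty
  rw [PySem.Dict.items_eq_map_keys _ hnd []]
  have hkeys : (pairs.foldl (fun d p => d.modify p.1 [] (· ++ [p.2])) PySem.Dict.empty).keys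
      = PySem.List.dedup (valid.map pvTs) := by
    rw [PySem.Dict.keys_foldl_modify_key]
    simp [PySem.Dict.keys_empty, hp, List.map_map, PySem.List.dedup_eq_ofList, PySem.Set.update, PySem.Set.ofList_eq_foldl, Function.comp_def]
  rw [hkeys]
  apply List.map_congr_left
  intro k _
  congr 1
  rw [PySem.Dict.getD_foldl_modify_append, PySem.Dict.getD_empty]
  simp [hp, List.filter_map, List.map_map, Function.comp_def]

-- ===== VERDICT (by name: the statement is the Claim_ definition above) =====
theorem group_by_ts_py_spec : Claim_equal_group_by_ts_py := by
  intro rows _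
  unfold Spec_group_by_ts_py
  exact group_by_ts_py_eq_alt rows
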